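-- pv_equiv track=rewrite | github.com/cyberbanana777/obj_det | finaly_logic.py | find_isolated_regions
-- ===== SOURCE A (Python) =====
-- def find_isolated_regions(matrix, demention):
--     if not matrix or len(matrix) != demention or any(len(row) != demention for row in matrix):
--         return 0
--
--     rows, cols = demention, demention
--     count = 0
--     # Создаем копию матрицы для визуализации
--     visualization = [row.copy() for row in matrix]
--
--     def dfs(i, j, marker):
--         if i < 0 or i >= rows or j < 0 or j >= cols or visualization[i][j] != 1:
--             return 0
--         visualization[i][j] = marker  # Помечаем текущую компоненту
--         size = 1  # Текущий элемент
--         # 4-направленная проверка и суммируем размер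
--         size += dfs(i + 1, j, marker)
--         size += dfs(i - 1, j, marker)
--         size += dfs(i, j + 1, marker)
--         size += dfs(i, j - 1, marker)
--         return size
--
--     for i in range(rows):
--         for j in range(cols):
--             if visualization[i][j] == 1:
--                 size = dfs(i, j, marker=count + 2)  # Маркеры: 2, 3, 4...
--                 if size > 4:
--                     count += 1
--     return count
-- ===== SOURCE B (Python) =====
-- def find_isolated_regions(matrix, demention):
--     if not matrix or len(matrix) != demention or any(len(row) != demention for row in matrix):
--         return 0
--     n = demention
--     visited = set()
--     count = 0
--     for i in range(n):
--         for j in range(n):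
--             if matrix[i][j] == 1 and (i, j) not in visited:
--                 size = 0
--                 stack = [(i, j)]
--                 while stack:
--                     x, y = stack.pop()
--                     if 0 <= x < n and 0 <= y < n and matrix[x][y] == 1 and (x, y) not in visited:
--                         visited.add((x, y))
--                         size += 1
--                         stack.append((x, y - 1))
--                         stack.append((x, y + 1))
--                         stack.append((x - 1, y))
--                         stack.append((x + 1, y))
--                 if size > 4:
--                     count += 1
--     return count
-- ===== Notes on version B (the rewrite author's own statement) =====
-- stated objective: alternative
-- what changed: Replaces A's recursive DFS with marker-writes into a copied matrix by an iterative flood fill using an explicit stack and a visited set, never copying or mutating the matrix.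
import Mathlib
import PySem

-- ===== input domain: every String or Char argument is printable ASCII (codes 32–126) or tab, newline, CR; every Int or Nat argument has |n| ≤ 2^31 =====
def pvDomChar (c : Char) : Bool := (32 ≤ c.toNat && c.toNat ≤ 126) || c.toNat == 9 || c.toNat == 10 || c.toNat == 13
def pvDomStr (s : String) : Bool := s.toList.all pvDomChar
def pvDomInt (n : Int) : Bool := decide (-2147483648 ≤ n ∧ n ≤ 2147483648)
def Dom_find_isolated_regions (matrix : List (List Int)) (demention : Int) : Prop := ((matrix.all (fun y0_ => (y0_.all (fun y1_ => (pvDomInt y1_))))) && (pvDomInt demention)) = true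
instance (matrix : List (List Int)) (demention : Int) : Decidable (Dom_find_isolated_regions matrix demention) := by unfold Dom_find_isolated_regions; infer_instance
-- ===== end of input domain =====

-- B replaces A's recursive marker-writing DFS by an iterative explicit-stack flood fill with a
-- visited set (no copy/mutation of the matrix); equivalence is about the return value (neither
-- port mutates; Python A only mutates its private copy).

-- ===== PORT A =====

-- matrix[i][j]; every use below is guarded by 0 ≤ i < n, 0 ≤ j < n, so pyGetD is exact
def pvCell (g : List (List Int)) (i j : Int) : Int :=
  PySem.List.pyGetD (PySem.List.pyGetD g i []) j 0

-- visualization[i][j] = v; every use is guarded by the same bounds, so pySetD is exact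
def pvSetCell (g : List (List Int)) (i j : Int) (v : Int) : List (List Int) :=
  PySem.List.pySetD g i (PySem.List.pySetD (PySem.List.pyGetD g i []) j v)

-- number of cells equal to 1 (only a FUEL bound for the recursion; A's recursion depth is
-- strictly bounded by it because each level first overwrites a 1-cell with a marker ≠ 1)
def pvOnes (g : List (List Int)) : Nat :=
  (g.map (fun r => r.countP (fun x => x == 1))).sum

def dfsA (n : Int) : Nat → Int → Int → Int → List (List Int) → Int × List (List Int)
  | 0, _, _, _, g => (0, g)   -- fuel exhausted: unreachable, the callers pass pvOnes g + 1
  | Nat.succ fuel, i, j, m, g =>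
    if i < 0 ∨ n ≤ i ∨ j < 0 ∨ n ≤ j ∨ pvCell g i j ≠ 1 then (0, g)
    else
      let g1 := pvSetCell g i j m
      let r1 := dfsA n fuel (i + 1) j m g1
      let r2 := dfsA n fuel (i - 1) j m r1.2
      let r3 := dfsA n fuel i (j + 1) m r2.2
      let r4 := dfsA n fuel i (j - 1) m r3.2
      (1 + r1.1 + r2.1 + r3.1 + r4.1, r4.2)

-- inner 'for j in range(cols)' of A; state = (count, visualization)
def loopA_row (n i : Int) : List Int → Int × List (List Int) → Int × List (List Int)
  | [], st => st
  | j :: js, (count, g) =>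
    if pvCell g i j = 1 then
      let r := dfsA n (pvOnes g + 1) i j (count + 2) g
      loopA_row n i js ((if r.1 > 4 then count + 1 else count), r.2)
    else loopA_row n i js (count, g)

-- outer 'for i in range(rows)'
def loopA_all (n : Int) : List Int → Int × List (List Int) → Int × List (List Int)
  | [], st => st
  | i :: is, st => loopA_all n is (loopA_row n i (PySem.List.pyRange 0 n 1) st)

def find_isolated_regions (matrix : List (List Int)) (demention : Int) : Int :=
  if matrix = [] ∨ (matrix.length : Int) ≠ demention ∨ ∃ row ∈ matrix, (row.length : Int) ≠ demention then 0
  else (loopA_all demention (PySem.List.pyRange 0 demention 1) (0, matrix)).1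

-- ===== PORT B =====

-- cells (i, j) with 0 ≤ i, j < n; only the termination measure of the while-loop below
def pvAllCells (n : Int) : List (Int × Int) :=
  (PySem.List.pyRange 0 n 1).flatMap (fun i => (PySem.List.pyRange 0 n 1).map (fun j => (i, j)))

-- unvisited 1-cells: strictly decreases on every valid pop (termination measure only)
def pvRemaining (M : List (List Int)) (n : Int) (vis : List (Int × Int)) : Nat :=
  ((pvAllCells n).filter (fun c => pvCell M c.1 c.2 == 1 && !(decide (c ∈ vis)))).length

lemma pvCountP_lt {α : Type} {l : List α} {p q : α → Bool} {c : α} (hc : c ∈ l)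
    (hpq : ∀ x ∈ l, q x = true → p x = true) (hp : p c = true) (hq : q c = false) :
    l.countP q < l.countP p := by
  induction l with
  | nil => cases hc
  | cons a t ih =>
    rcases List.mem_cons.1 hc with rfl | hct
    · simp [hp, hq]
      exact List.countP_mono_left (fun x hx h => hpq x (List.mem_cons_of_mem _ hx) h)
    · have ih' := ih hct (fun x hx h => hpq x (List.mem_cons_of_mem _ hx) h)
      by_cases hqa : q a = true
      · have hpa := hpq a (List.mem_cons_self ..) hqa
        simp [hqa, hpa]; omega
      · simp [List.countP_cons, hqa]
        by_cases hpa : p a = true <;> simp [hpa] <;> omega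

lemma pvRemaining_add_lt (M : List (List Int)) (n : Int) (vis : List (Int × Int)) (x y : Int)
    (hx0 : 0 ≤ x) (hxn : x < n) (hy0 : 0 ≤ y) (hyn : y < n)
    (h1 : pvCell M x y = 1) (hnv : (x, y) ∉ vis) :
    pvRemaining M n (PySem.Set.add vis (x, y)) < pvRemaining M n vis := by
  unfold pvRemaining
  rw [← List.countP_eq_length_filter, ← List.countP_eq_length_filter]
  apply pvCountP_lt (c := (x, y))
  · unfold pvAllCells
    refine List.mem_flatMap.2 ⟨x, ?_, List.mem_map.2 ⟨y, ?_, rfl⟩⟩ <;>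
      simp [PySem.List.mem_pyRange_one, hx0, hxn, hy0, hyn]
  · intro c _ h
    simp only [Bool.and_eq_true, Bool.not_eq_true', decide_eq_false_iff_not] at h ⊢
    exact ⟨h.1, fun hc => h.2 (by simpa [PySem.Set.mem_add] using Or.inl hc)⟩
  · simp [h1, hnv]
  · simp [PySem.Set.mem_add]

-- the 'while stack:' loop of B; state = (size, visited)
def loopB (M : List (List Int)) (n : Int) :
    List (Int × Int) → Int → List (Int × Int) → Int × List (Int × Int)
  | [], size, vis => (size, vis)
  | (x, y) :: rest, size, vis =>
    if h : 0 ≤ x ∧ x < n ∧ 0 ≤ y ∧ y < n ∧ pvCell M x y = 1 ∧ (x, y) ∉ vis then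
      loopB M n ((x + 1, y) :: (x - 1, y) :: (x, y + 1) :: (x, y - 1) :: rest)
        (size + 1) (PySem.Set.add vis (x, y))
    else loopB M n rest size vis
  termination_by stack _ vis => (pvRemaining M n vis, stack.length)
  decreasing_by
  · exact Prod.Lex.left _ _ (pvRemaining_add_lt M n vis x y h.1 h.2.1 h.2.2.1 h.2.2.2.1 h.2.2.2.2.1 h.2.2.2.2.2)
  · exact Prod.Lex.right _ (Nat.lt_succ_self _)

-- inner 'for j in range(n)' of B; state = (count, visited)
def loopB_row (M : List (List Int)) (n i : Int) :
    List Int → Int × List (Int × Int) → Int × List (Int × Int)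
  | [], st => st
  | j :: js, (count, vis) =>
    if pvCell M i j = 1 ∧ (i, j) ∉ vis then
      let r := loopB M n [(i, j)] 0 vis
      loopB_row M n i js ((if r.1 > 4 then count + 1 else count), r.2)
    else loopB_row M n i js (count, vis)

def loopB_all (M : List (List Int)) (n : Int) :
    List Int → Int × List (Int × Int) → Int × List (Int × Int)
  | [], st => st
  | i :: is, st => loopB_all M n is (loopB_row M n i (PySem.List.pyRange 0 n 1) st)

def find_isolated_regions_alt (matrix : List (List Int)) (demention : Int) : Int :=
  if matrix = [] ∨ (matrix.length : Int) ≠ demention ∨ ∃ row ∈ matrix, (row.length : Int) ≠ demention then 0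
  else (loopB_all matrix demention (PySem.List.pyRange 0 demention 1) (0, [])).1

-- ===== PRECONDITION & SPEC =====
def Spec_find_isolated_regions (matrix : List (List Int)) (demention : Int) (out : Int) : Prop := out = find_isolated_regions_alt matrix demention
instance (matrix : List (List Int)) (demention : Int) (out : Int) : Decidable (Spec_find_isolated_regions matrix demention out) := by unfold Spec_find_isolated_regions; infer_instance

-- ===== CLAIM (what is proved, stated in full; the proofs are below) =====
def Claim_equal_find_isolated_regions : Prop := ∀ (matrix : List (List Int)) (demention : Int), Dom_find_isolated_regions matrix demention → Spec_find_isolated_regions matrix demention (find_isolated_regions matrix demention)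

-- ===== LEMMAS AND PROOFS =====

-- the matrix/visualization is an n × n grid
def pvWF (g : List (List Int)) (n : Int) : Prop :=
  (g.length : Int) = n ∧ ∀ r ∈ g, (r.length : Int) = n

-- the coupling invariant: a cell of A's visualization still holds 1 iff the original cell
-- holds 1 and B has not visited it (A's markers are ≥ 2, hence ≠ 1)
def pvRel (M g : List (List Int)) (n : Int) (vis : List (Int × Int)) : Prop :=
  ∀ i j : Int, 0 ≤ i → i < n → 0 ≤ j → j < n →
    (pvCell g i j = 1 ↔ (pvCell M i j = 1 ∧ (i, j) ∉ vis))


lemma pvIdx_lt {g : List (List Int)} {n i : Int} (hWF : pvWF g n) (h0 : 0 ≤ i) (hn : i < n) :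
    i.toNat < g.length := by
  have := hWF.1; omega

lemma pvRow_lt {g : List (List Int)} {n j : Int} (hWF : pvWF g n) {r : List Int} (hr : r ∈ g)
    (h0 : 0 ≤ j) (hn : j < n) : j.toNat < r.length := by
  have := hWF.2 r hr; omega

lemma pvCell_eq_getElem {g : List (List Int)} {n : Int} (hWF : pvWF g n) {i j : Int}
    (hi0 : 0 ≤ i) (hin : i < n) (hj0 : 0 ≤ j) (hjn : j < n) :
    pvCell g i j = (g[i.toNat]'(pvIdx_lt hWF hi0 hin))[j.toNat]'(pvRow_lt hWF (List.getElem_mem _) hj0 hjn) := by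
  unfold pvCell
  rw [PySem.List.pyGetD_eq_getElem g [] hi0 (by have := hWF.1; omega)]
  rw [PySem.List.pyGetD_eq_getElem _ 0 hj0 (by have := hWF.2 _ (List.getElem_mem (pvIdx_lt hWF hi0 hin)); omega)]

lemma pvSetCell_eq (g : List (List Int)) (i j v : Int) (hi0 : 0 ≤ i) (hj0 : 0 ≤ j) :
    pvSetCell g i j v = g.set i.toNat ((PySem.List.pyGetD g i []).set j.toNat v) := by
  unfold pvSetCell
  rw [PySem.List.pySetD_of_nonneg _ _ hj0, PySem.List.pySetD_of_nonneg _ _ hi0]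

lemma pvRow_eq {g : List (List Int)} {n i : Int} (hWF : pvWF g n) (hi0 : 0 ≤ i) (hin : i < n) :
    PySem.List.pyGetD g i [] = g[i.toNat]'(pvIdx_lt hWF hi0 hin) :=
  PySem.List.pyGetD_eq_getElem g [] hi0 (by have := hWF.1; omega)

lemma pvWF_setCell {g : List (List Int)} {n : Int} (hWF : pvWF g n) {i j : Int} (v : Int)
    (hi0 : 0 ≤ i) (hin : i < n) (hj0 : 0 ≤ j) : pvWF (pvSetCell g i j v) n := by
  rw [pvSetCell_eq g i j v hi0 hj0]
  refine ⟨by simpa using hWF.1, ?_⟩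
  intro r hr
  rcases List.mem_or_eq_of_mem_set hr with h | rfl
  · exact hWF.2 r h
  · rw [List.length_set, pvRow_eq hWF hi0 hin]
    exact hWF.2 _ (List.getElem_mem _)

lemma pvCell_setCell_self {g : List (List Int)} {n : Int} (hWF : pvWF g n) {i j : Int} (v : Int)
    (hi0 : 0 ≤ i) (hin : i < n) (hj0 : 0 ≤ j) (hjn : j < n) :
    pvCell (pvSetCell g i j v) i j = v := by
  rw [pvCell_eq_getElem (pvWF_setCell hWF v hi0 hin hj0) hi0 hin hj0 hjn]
  simp only [pvSetCell_eq g i j v hi0 hj0, pvRow_eq hWF hi0 hin]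
  simp

lemma pvCell_setCell_ne {g : List (List Int)} {n : Int} (hWF : pvWF g n) {i j i' j' : Int} (v : Int)
    (hi0 : 0 ≤ i) (hin : i < n) (hj0 : 0 ≤ j) (_hjn : j < n)
    (hi0' : 0 ≤ i') (hin' : i' < n) (hj0' : 0 ≤ j') (hjn' : j' < n)
    (hne : ¬ (i' = i ∧ j' = j)) :
    pvCell (pvSetCell g i j v) i' j' = pvCell g i' j' := by
  rw [pvCell_eq_getElem (pvWF_setCell hWF v hi0 hin hj0) hi0' hin' hj0' hjn',
      pvCell_eq_getElem hWF hi0' hin' hj0' hjn']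
  simp only [pvSetCell_eq g i j v hi0 hj0, pvRow_eq hWF hi0 hin]
  by_cases hii : i' = i
  · subst hii
    have hjj : j' ≠ j := fun h => hne ⟨rfl, h⟩
    have hjj' : j.toNat ≠ j'.toNat := by omega
    simp [hjj']
  · have hii' : i.toNat ≠ i'.toNat := by omega
    simp [hii']

lemma pvSum_set_nat (l : List Nat) (k : Nat) (a : Nat) (h : k < l.length) :
    (l.set k a).sum + l[k] = l.sum + a := by
  induction l generalizing k with
  | nil => simp at h
  | cons b t ih =>
    cases k with
    | zero => simp [List.sum_cons]; omega
    | succ k =>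
      simp only [List.set_cons_succ, List.sum_cons, List.getElem_cons_succ]
      have := ih k (by simpa using Nat.lt_of_succ_lt_succ h)
      omega

lemma pvCountP_set_nat (l : List Int) (k : Nat) (v : Int) (hk : k < l.length)
    (h1 : l[k] = 1) (hv : v ≠ 1) :
    (l.set k v).countP (fun x => x == 1) + 1 = l.countP (fun x => x == 1) := by
  induction l generalizing k with
  | nil => simp at hk
  | cons a t ih =>
    cases k with
    | zero =>
      simp only [List.getElem_cons_zero] at h1
      simp [h1, hv]
    | succ k =>
      simp only [List.getElem_cons_succ] at h1
      have := ih k (by simpa using Nat.lt_of_succ_lt_succ hk) h1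
      simp only [List.set_cons_succ, List.countP_cons]
      omega

lemma pvOnes_setCell {g : List (List Int)} {n : Int} (hWF : pvWF g n) {i j : Int} (v : Int)
    (hi0 : 0 ≤ i) (hin : i < n) (hj0 : 0 ≤ j) (hjn : j < n)
    (h1 : pvCell g i j = 1) (hv : v ≠ 1) :
    pvOnes (pvSetCell g i j v) + 1 = pvOnes g := by
  have hi := pvIdx_lt hWF hi0 hin
  have hj := pvRow_lt hWF (List.getElem_mem hi) hj0 hjn
  rw [pvCell_eq_getElem hWF hi0 hin hj0 hjn] at h1
  unfold pvOnes
  rw [pvSetCell_eq g i j v hi0 hj0, pvRow_eq hWF hi0 hin, List.map_set]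
  have hs := pvSum_set_nat (g.map (fun r => r.countP (fun x => x == 1))) i.toNat
      ((g[i.toNat].set j.toNat v).countP (fun x => x == 1)) (by simpa using hi)
  rw [List.getElem_map] at hs
  have hc := pvCountP_set_nat g[i.toNat] j.toNat v hj h1 hv
  omega

lemma pvRel_setCell {M g : List (List Int)} {n : Int} {vis : List (Int × Int)}
    (hRel : pvRel M g n vis) (hWF : pvWF g n) {i j v : Int}
    (hi0 : 0 ≤ i) (hin : i < n) (hj0 : 0 ≤ j) (hjn : j < n) (hv : v ≠ 1) :
    pvRel M (pvSetCell g i j v) n (PySem.Set.add vis (i, j)) := by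
  intro i' j' h1 h2 h3 h4
  by_cases hij : i' = i ∧ j' = j
  · obtain ⟨rfl, rfl⟩ := hij
    rw [pvCell_setCell_self hWF v hi0 hin hj0 hjn]
    constructor
    · intro h; exact absurd h hv
    · rintro ⟨-, hmem⟩
      exact absurd ((PySem.Set.mem_add _ _ _).2 (Or.inr rfl)) hmem
  · rw [pvCell_setCell_ne hWF v hi0 hin hj0 hjn h1 h2 h3 h4 hij]
    rw [hRel i' j' h1 h2 h3 h4]
    have hmem : ((i', j') ∈ PySem.Set.add vis (i, j)) ↔ (i', j') ∈ vis := by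
      rw [PySem.Set.mem_add]
      constructor
      · rintro (h | h)
        · exact h
        · exact absurd (Prod.mk.injEq .. ▸ h) hij
      · exact Or.inl
    rw [not_congr hmem]

lemma pvSim (M : List (List Int)) (n : Int) :
    ∀ (fuel : Nat) (g : List (List Int)) (vis : List (Int × Int)) (i j m : Int)
      (rest : List (Int × Int)) (size : Int),
      pvWF g n → pvRel M g n vis → pvOnes g < fuel → m ≠ 1 →
      ∃ vis', pvWF (dfsA n fuel i j m g).2 n ∧ pvRel M (dfsA n fuel i j m g).2 n vis' ∧
        pvOnes (dfsA n fuel i j m g).2 ≤ pvOnes g ∧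
        loopB M n ((i, j) :: rest) size vis = loopB M n rest (size + (dfsA n fuel i j m g).1) vis' := by
  intro fuel
  induction fuel with
  | zero => intro g vis i j m rest size _ _ h _; omega
  | succ fuel ih =>
    intro g vis i j m rest size hWF hRel hones hm
    by_cases hA : i < 0 ∨ n ≤ i ∨ j < 0 ∨ n ≤ j ∨ pvCell g i j ≠ 1
    · have hres : dfsA n (fuel + 1) i j m g = (0, g) := by
        simp only [dfsA]; rw [if_pos hA]
      have hB : ¬ (0 ≤ i ∧ i < n ∧ 0 ≤ j ∧ j < n ∧ pvCell M i j = 1 ∧ (i, j) ∉ vis) := by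
        rintro ⟨h1, h2, h3, h4, h5, h6⟩
        have := (hRel i j h1 h2 h3 h4).2 ⟨h5, h6⟩
        rcases hA with h | h | h | h | h <;> omega
      refine ⟨vis, by rw [hres]; exact hWF, by rw [hres]; exact hRel, by rw [hres], ?_⟩
      rw [hres]
      rw [loopB, dif_neg hB]
      norm_num
    · have hA' := hA
      push Not at hA
      obtain ⟨hi0, hin, hj0, hjn, hc⟩ := hA
      have hM1 : pvCell M i j = 1 ∧ (i, j) ∉ vis := (hRel i j hi0 hin hj0 hjn).1 hc
      have hWF1 := pvWF_setCell hWF m hi0 hin hj0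
      have hRel1 := pvRel_setCell hRel hWF hi0 hin hj0 hjn hm
      have hones1 : pvOnes (pvSetCell g i j m) + 1 = pvOnes g :=
        pvOnes_setCell hWF m hi0 hin hj0 hjn hc hm
      obtain ⟨v1, hWF2, hRel2, ho2, hL1⟩ :=
        ih (pvSetCell g i j m) (PySem.Set.add vis (i, j)) (i + 1) j m
          ((i - 1, j) :: (i, j + 1) :: (i, j - 1) :: rest) (size + 1) hWF1 hRel1 (by omega) hm
      obtain ⟨v2, hWF3, hRel3, ho3, hL2⟩ :=
        ih _ v1 (i - 1) j m ((i, j + 1) :: (i, j - 1) :: rest)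
          (size + 1 + (dfsA n fuel (i + 1) j m (pvSetCell g i j m)).1) hWF2 hRel2 (by omega) hm
      obtain ⟨v3, hWF4, hRel4, ho4, hL3⟩ :=
        ih _ v2 i (j + 1) m ((i, j - 1) :: rest)
          (size + 1 + (dfsA n fuel (i + 1) j m (pvSetCell g i j m)).1
            + (dfsA n fuel (i - 1) j m (dfsA n fuel (i + 1) j m (pvSetCell g i j m)).2).1)
          hWF3 hRel3 (by omega) hm
      obtain ⟨v4, hWF5, hRel5, ho5, hL4⟩ :=
        ih _ v3 i (j - 1) m rest
          (size + 1 + (dfsA n fuel (i + 1) j m (pvSetCell g i j m)).1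
            + (dfsA n fuel (i - 1) j m (dfsA n fuel (i + 1) j m (pvSetCell g i j m)).2).1
            + (dfsA n fuel i (j + 1) m (dfsA n fuel (i - 1) j m (dfsA n fuel (i + 1) j m (pvSetCell g i j m)).2).2).1)
          hWF4 hRel4 (by omega) hm
      have hstep : dfsA n (fuel + 1) i j m g =
          (1 + (dfsA n fuel (i + 1) j m (pvSetCell g i j m)).1
             + (dfsA n fuel (i - 1) j m (dfsA n fuel (i + 1) j m (pvSetCell g i j m)).2).1
             + (dfsA n fuel i (j + 1) m (dfsA n fuel (i - 1) j m (dfsA n fuel (i + 1) j m (pvSetCell g i j m)).2).2).1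
             + (dfsA n fuel i (j - 1) m (dfsA n fuel i (j + 1) m (dfsA n fuel (i - 1) j m (dfsA n fuel (i + 1) j m (pvSetCell g i j m)).2).2).2).1,
           (dfsA n fuel i (j - 1) m (dfsA n fuel i (j + 1) m (dfsA n fuel (i - 1) j m (dfsA n fuel (i + 1) j m (pvSetCell g i j m)).2).2).2).2) := by
        simp only [dfsA]; rw [if_neg hA']
      have hBstep : loopB M n ((i, j) :: rest) size vis =
          loopB M n ((i + 1, j) :: (i - 1, j) :: (i, j + 1) :: (i, j - 1) :: rest)
            (size + 1) (PySem.Set.add vis (i, j)) := by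
        rw [loopB, dif_pos ⟨hi0, hin, hj0, hjn, hM1.1, hM1.2⟩]
      refine ⟨v4, by rw [hstep]; exact hWF5, by rw [hstep]; exact hRel5, by rw [hstep]; simpa using by omega, ?_⟩
      rw [hstep, hBstep, hL1, hL2, hL3, hL4]
      congr 1
      ring

lemma pvSimRow (M : List (List Int)) (n i : Int) (hi0 : 0 ≤ i) (hin : i < n) :
    ∀ (js : List Int) (count : Int) (g : List (List Int)) (vis : List (Int × Int)),
      pvWF g n → pvRel M g n vis → (∀ j ∈ js, 0 ≤ j ∧ j < n) → 0 ≤ count →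
      ∃ c' g' vis', loopA_row n i js (count, g) = (c', g') ∧
        loopB_row M n i js (count, vis) = (c', vis') ∧
        pvWF g' n ∧ pvRel M g' n vis' ∧ 0 ≤ c' := by
  intro js
  induction js with
  | nil => intro count g vis hWF hRel _ hc; exact ⟨count, g, vis, rfl, rfl, hWF, hRel, hc⟩
  | cons j js ih =>
    intro count g vis hWF hRel hb hc
    obtain ⟨hj0, hjn⟩ := hb j (List.mem_cons_self ..)
    have hb' : ∀ j ∈ js, 0 ≤ j ∧ j < n := fun x hx => hb x (List.mem_cons_of_mem _ hx)
    by_cases hg : pvCell g i j = 1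
    · have hM : pvCell M i j = 1 ∧ (i, j) ∉ vis := (hRel i j hi0 hin hj0 hjn).1 hg
      obtain ⟨v1, hWF1, hRel1, -, hL⟩ :=
        pvSim M n (pvOnes g + 1) g vis i j (count + 2) [] 0 hWF hRel (Nat.lt_succ_self _) (by omega)
      have hr : loopB M n [(i, j)] 0 vis = (0 + (dfsA n (pvOnes g + 1) i j (count + 2) g).1, v1) := by
        rw [hL, loopB]
      have hA : loopA_row n i (j :: js) (count, g) =
          loopA_row n i js ((if (dfsA n (pvOnes g + 1) i j (count + 2) g).1 > 4 then count + 1 else count),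
            (dfsA n (pvOnes g + 1) i j (count + 2) g).2) := by
        simp only [loopA_row]; rw [if_pos hg]
      have hB : loopB_row M n i (j :: js) (count, vis) =
          loopB_row M n i js ((if (dfsA n (pvOnes g + 1) i j (count + 2) g).1 > 4 then count + 1 else count), v1) := by
        simp only [loopB_row]
        rw [if_pos hM, hr]
        norm_num
      rw [hA, hB]
      exact ih _ _ _ hWF1 hRel1 hb' (by split <;> omega)
    · have hM : ¬ (pvCell M i j = 1 ∧ (i, j) ∉ vis) := fun h => hg ((hRel i j hi0 hin hj0 hjn).2 h)
      have hA : loopA_row n i (j :: js) (count, g) = loopA_row n i js (count, g) := by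
        simp only [loopA_row]; rw [if_neg hg]
      have hB : loopB_row M n i (j :: js) (count, vis) = loopB_row M n i js (count, vis) := by
        simp only [loopB_row]; rw [if_neg hM]
      rw [hA, hB]
      exact ih _ _ _ hWF hRel hb' hc

lemma pvSimAll (M : List (List Int)) (n : Int) :
    ∀ (is : List Int) (count : Int) (g : List (List Int)) (vis : List (Int × Int)),
      pvWF g n → pvRel M g n vis → (∀ i ∈ is, 0 ≤ i ∧ i < n) → 0 ≤ count →
      (loopA_all n is (count, g)).1 = (loopB_all M n is (count, vis)).1 := by
  intro is
  induction is with
  | nil => intro count g vis _ _ _ _; rfl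
  | cons i is ih =>
    intro count g vis hWF hRel hb hc
    obtain ⟨hi0, hin⟩ := hb i (List.mem_cons_self ..)
    obtain ⟨c', g', vis', hA, hB, hWF', hRel', hc'⟩ :=
      pvSimRow M n i hi0 hin (PySem.List.pyRange 0 n 1) count g vis hWF hRel
        (fun j hj => PySem.List.mem_pyRange_one.1 hj) hc
    simp only [loopA_all, loopB_all, hA, hB]
    exact ih c' g' vis' hWF' hRel' (fun x hx => hb x (List.mem_cons_of_mem _ hx)) hc'

theorem find_isolated_regions_spec : Claim_equal_find_isolated_regions := by
  intro matrix demention _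
  unfold Spec_find_isolated_regions find_isolated_regions find_isolated_regions_alt
  by_cases h : matrix = [] ∨ (matrix.length : Int) ≠ demention ∨ ∃ row ∈ matrix, (row.length : Int) ≠ demention
  · rw [if_pos h, if_pos h]
  · rw [if_neg h, if_neg h]
    push Not at h
    obtain ⟨-, hlen, hrows⟩ := h
    have hWF : pvWF matrix demention := ⟨hlen, hrows⟩
    have hRel : pvRel matrix matrix demention [] := by
      intro i j _ _ _ _; simp
    exact pvSimAll matrix demention (PySem.List.pyRange 0 demention 1) 0 matrix [] hWF hRel
      (fun i hi => PySem.List.mem_pyRange_one.1 hi) le_rfl
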